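-- pv_equiv track=rewrite | github.com/cvr-bhupalreddy/dsa-python-2025 | DSA/Graphs/DisjointSet_Union_Find/3.MinOperations.py | min_operations_to_connect
-- ===== SOURCE A (Python) =====
-- def min_operations_to_connect(n, edges):
--     parent = [i for i in range(n)]
--     rank = [0] * n
--
--     def find(x):
--         if parent[x] != x:
--             parent[x] = find(parent[x])  # path compression
--         return parent[x]
--
--     def union(x, y):
--         px, py = find(x), find(y)
--         if px == py:
--             return False  # redundant edge
--         if rank[px] < rank[py]:
--             parent[px] = py
--         elif rank[px] > rank[py]:
--             parent[py] = px
--         else: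
--             parent[py] = px
--             rank[px] += 1
--         return True
--
--     redundant = 0
--
--     for u, v in edges:
--         if not union(u, v):
--             redundant += 1
--
--     # count connected components
--     components = len(set(find(i) for i in range(n)))
--
--     # need (components - 1) edges to connect all components
--     if redundant >= components - 1:
--         return components - 1
--     else:
--         return -1
-- ===== SOURCE B (Python) =====
-- def min_operations_to_connect(n, edges):
--     # Component counting by label substitution instead of union-find;
--     # the edge-budget test "redundant >= components-1" collapses to len(edges) >= n-1.
--     label = list(range(n))
--     for u, v in edges:
--         lu, lv = label[u], label[v]
--         if lu != lv:
--             label = [lu if t == lv else t for t in label]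
--     if len(edges) >= n - 1:
--         return len(set(label)) - 1
--     else:
--         return -1
-- ===== Notes on version B (the rewrite author's own statement) =====
-- stated objective: alternative
-- what changed: Replaces the recursive union-find with path compression and union by rank by a plain component-labelling array updated by value substitution per edge, and replaces the final 'redundant >= components-1' test by the equivalent closed-form edge-count check len(edges) >= n-1.
import Mathlib
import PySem

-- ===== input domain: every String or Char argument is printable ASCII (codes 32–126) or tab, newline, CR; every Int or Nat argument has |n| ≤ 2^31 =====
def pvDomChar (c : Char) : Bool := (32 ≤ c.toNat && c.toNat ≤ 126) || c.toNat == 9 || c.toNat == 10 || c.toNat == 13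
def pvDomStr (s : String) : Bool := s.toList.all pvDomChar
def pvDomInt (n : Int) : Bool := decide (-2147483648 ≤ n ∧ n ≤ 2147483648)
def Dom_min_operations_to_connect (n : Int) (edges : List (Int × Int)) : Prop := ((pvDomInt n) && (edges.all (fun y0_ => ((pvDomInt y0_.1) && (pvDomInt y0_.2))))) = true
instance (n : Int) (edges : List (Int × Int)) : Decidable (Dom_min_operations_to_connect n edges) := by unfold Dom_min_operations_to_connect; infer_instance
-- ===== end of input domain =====

-- B replaces union-find (path compression + union by rank) by per-edge label substitution
-- over a component-label array, and the final redundancy test by the equivalent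
-- closed-form check len(edges) >= n-1.  Same return value on all inputs where A returns.

-- ===== PORT A =====
-- Python lists are O(1)-indexed arrays, so the union-find state is held in Lean
-- Arrays; len(set(..)) is computed with a hash set exactly as Python's set does.
-- pvAGet?/pvASet? are Python indexing (negative wraparound, none = IndexError).
def pvSetLen (l : List Int) : Int := ((Std.HashSet.ofList l).size : Int)

def pvAGet? (xs : Array Int) (i : Int) : Option Int :=
  (PySem.List.pyIdx? xs.size i).bind (fun k => xs[k]?)

def pvASet? (xs : Array Int) (i : Int) (v : Int) : Option (Array Int) :=
  (PySem.List.pyIdx? xs.size i).map (fun k => xs.setIfInBounds k v)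

-- `find(x)`: recursion ported with fuel = len(parent)+1 (always sufficient: parent
-- chains visit distinct nodes of strictly increasing rank); `none` = IndexError.
def pvFindA : Nat → Array Int → Int → Option (Array Int × Int)
  | 0, _, _ => none
  | fuel+1, parent, x =>
    match pvAGet? parent x with
    | none => none
    | some p =>
      if p ≠ x then
        match pvFindA fuel parent p with
        | none => none
        | some (parent1, r) =>
          match pvASet? parent1 x r with
          | none => none
          | some parent2 => some (parent2, r)   -- returns parent[x], just set to r
      else some (parent, x)                      -- returns parent[x] = x

-- `union(x, y)` threading (parent, rank); Bool is union's return value.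
def pvUnionA (fuel : Nat) (parent rank : Array Int) (x y : Int) :
    Option (Array Int × Array Int × Bool) :=
  match pvFindA fuel parent x with
  | none => none
  | some (p1, px) =>
    match pvFindA fuel p1 y with
    | none => none
    | some (p2, py) =>
      if px = py then some (p2, rank, false)
      else
        match pvAGet? rank px, pvAGet? rank py with
        | some rpx, some rpy =>
          if rpx < rpy then
            (pvASet? p2 px py).map (fun p3 => (p3, rank, true))
          else if rpx > rpy then
            (pvASet? p2 py px).map (fun p3 => (p3, rank, true))
          else
            match pvASet? p2 py px, pvASet? rank px (rpx + 1) with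
            | some p3, some rk3 => some (p3, rk3, true)
            | _, _ => none
        | _, _ => none

def min_operations_to_connect (n : Int) (edges : List (Int × Int)) : Int :=
  let parent0 := (PySem.List.pyRange 0 n 1).toArray   -- [i for i in range(n)]
  let rank0 : Array Int := Array.replicate n.toNat 0  -- [0] * n
  let fuel := parent0.size + 1
  -- for u, v in edges: if not union(u, v): redundant += 1
  let st := edges.foldl (fun acc e =>
      match acc with
      | none => none
      | some (parent, rank, red) =>
        match pvUnionA fuel parent rank e.1 e.2 with
        | none => none
        | some (p', rk', b) => some (p', rk', if b then red else red + 1))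
    (some (parent0, rank0, (0 : Int)))
  match st with
  | none => 0   -- an IndexError was raised: outside Pre_
  | some (parent, _, red) =>
    -- components = len(set(find(i) for i in range(n)))
    let rootsSt := (PySem.List.pyRange 0 n 1).foldl (fun acc i =>
        match acc with
        | none => none
        | some (parent, roots) =>
          match pvFindA fuel parent i with
          | none => none
          | some (p', r) => some (p', r :: roots))   -- set(gen) consumes one root at a
      (some (parent, ([] : List Int)))               -- time; only its SIZE is used, so
                                                     -- the roots are collected by cons
    match rootsSt with
    | none => 0
    | some (_, roots) =>
      let components : Int := pvSetLen roots
      if red ≥ components - 1 then components - 1 else -1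

-- ===== PORT B =====
def min_operations_to_connect_alt (n : Int) (edges : List (Int × Int)) : Int :=
  let label0 := PySem.List.pyRange 0 n 1         -- list(range(n))
  let lab := edges.foldl (fun acc e =>
      match acc with
      | none => none
      | some label =>
        match PySem.List.pyGet? label e.1, PySem.List.pyGet? label e.2 with
        | some lu, some lv =>
          if lu ≠ lv then some (label.map (fun t => if t = lv then lu else t))
          else some label
        | _, _ => none)
    (some label0)
  match lab with
  | none => 0   -- an IndexError was raised: outside Pre_
  | some label =>
    if (edges.length : Int) ≥ n - 1 then pvSetLen label - 1
    else -1

-- ===== PRECONDITION & SPEC =====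
-- Pre_ excludes exactly the inputs where A raises IndexError: some edge endpoint
-- outside [-n, n) (Python list indexing with negative wraparound).
def Pre_min_operations_to_connect (n : Int) (edges : List (Int × Int)) : Prop :=
  ∀ e ∈ edges, (-n ≤ e.1 ∧ e.1 < n) ∧ (-n ≤ e.2 ∧ e.2 < n)
instance (n : Int) (edges : List (Int × Int)) : Decidable (Pre_min_operations_to_connect n edges) := by unfold Pre_min_operations_to_connect; infer_instance

def pvWitness_min_operations_to_connect : Int × (List (Int × Int)) := (3, [(0, 1), (-1, 0)])

def Spec_min_operations_to_connect (n : Int) (edges : List (Int × Int)) (out : Int) : Prop := out = min_operations_to_connect_alt n edges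
instance (n : Int) (edges : List (Int × Int)) (out : Int) : Decidable (Spec_min_operations_to_connect n edges out) := by unfold Spec_min_operations_to_connect; infer_instance

-- ===== CLAIM (what is proved, stated in full; the proofs are below) =====
def Claim_equal_min_operations_to_connect : Prop := ∀ (n : Int) (edges : List (Int × Int)), Dom_min_operations_to_connect n edges → Pre_min_operations_to_connect n edges → Spec_min_operations_to_connect n edges (min_operations_to_connect n edges)

-- ===== LEMMAS AND PROOFS =====

-- list-level versions of A's helpers (the proofs below are carried out on lists;
-- the Array port is transferred to them via `toList`)
def pvFindL : Nat → List Int → Int → Option (List Int × Int)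
  | 0, _, _ => none
  | fuel+1, parent, x =>
    match PySem.List.pyGet? parent x with
    | none => none
    | some p =>
      if p ≠ x then
        match pvFindL fuel parent p with
        | none => none
        | some (parent1, r) =>
          match PySem.List.pySet? parent1 x r with
          | none => none
          | some parent2 => some (parent2, r)
      else some (parent, x)

def pvUnionL (fuel : Nat) (parent rank : List Int) (x y : Int) :
    Option (List Int × List Int × Bool) :=
  match pvFindL fuel parent x with
  | none => none
  | some (p1, px) =>
    match pvFindL fuel p1 y with
    | none => none
    | some (p2, py) =>
      if px = py then some (p2, rank, false)
      else
        match PySem.List.pyGet? rank px, PySem.List.pyGet? rank py with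
        | some rpx, some rpy =>
          if rpx < rpy then
            (PySem.List.pySet? p2 px py).map (fun p3 => (p3, rank, true))
          else if rpx > rpy then
            (PySem.List.pySet? p2 py px).map (fun p3 => (p3, rank, true))
          else
            match PySem.List.pySet? p2 py px, PySem.List.pySet? rank px (rpx + 1) with
            | some p3, some rk3 => some (p3, rk3, true)
            | _, _ => none
        | _, _ => none

theorem pvAGet?_toList (xs : Array Int) (i : Int) :
    pvAGet? xs i = PySem.List.pyGet? xs.toList i := by
  simp [pvAGet?, PySem.List.pyGet?, Array.length_toList, Array.getElem?_toList]

theorem pvASet?_toList (xs : Array Int) (i : Int) (v : Int) :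
    (pvASet? xs i v).map Array.toList = PySem.List.pySet? xs.toList i v := by
  unfold pvASet? PySem.List.pySet?
  rw [Array.length_toList]
  cases h : PySem.List.pyIdx? xs.size i with
  | none => simp
  | some k => simp [Array.toList_setIfInBounds]

theorem pvFindA_toList : ∀ (fuel : Nat) (a : Array Int) (x : Int),
    (pvFindA fuel a x).map (fun pr => (pr.1.toList, pr.2)) = pvFindL fuel a.toList x := by
  intro fuel
  induction fuel with
  | zero => intro a x; rfl
  | succ fuel ih =>
    intro a x
    simp only [pvFindA, pvFindL, ← pvAGet?_toList]
    cases hg : pvAGet? a x with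
    | none => rfl
    | some p =>
      dsimp only
      by_cases hpx : p ≠ x
      · rw [if_pos hpx, if_pos hpx]
        rw [← ih a p]
        cases hf : pvFindA fuel a p with
        | none => rfl
        | some pr =>
          simp only [Option.map_some]
          rw [← pvASet?_toList pr.1 x pr.2]
          cases hs : pvASet? pr.1 x pr.2 <;> simp
      · rw [if_neg hpx, if_neg hpx]
        rfl


-- Normalised Python index into a list of length N.
def pvIdx (N : Nat) (x : Int) : Nat := if 0 ≤ x then x.toNat else N - (-x).toNat

-- parent pointer read as a Nat
def pvPget (p : List Int) (k : Nat) : Nat := (p.getD k 0).toNat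

-- pure (non-mutating) root computation with fuel
def pvRootF : Nat → List Int → Nat → Nat
  | 0, _, k => k
  | f+1, p, k => if pvPget p k = k then k else pvRootF f p (pvPget p k)

def pvRoot (p : List Int) (k : Nat) : Nat := pvRootF p.length p k

-- union-find state invariant: sizes, entries in range, rank strictly increases
-- along parent pointers
def pvInv (N : Nat) (p rk : List Int) : Prop :=
  p.length = N ∧ rk.length = N ∧
  (∀ k, k < N → 0 ≤ p.getD k 0 ∧ p.getD k 0 < N) ∧
  (∀ k, k < N → pvPget p k ≠ k → rk.getD k 0 < rk.getD (pvPget p k) 0)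

-- termination measure for chasing parent pointers
def pvM (N : Nat) (rk : List Int) (k : Nat) : Nat :=
  N - ((Finset.range N).filter (fun j => rk.getD j 0 ≤ rk.getD k 0)).card

-- coupling of A's union-find state with B's label list
def pvC (l : List Int) : Int := ((PySem.Set.ofList l).length : Int)

def pvCouple (N : Nat) (p rk label : List Int) : Prop :=
  pvInv N p rk ∧ label.length = N ∧
  ∀ i j, i < N → j < N → (pvRoot p i = pvRoot p j ↔ label.getD i 0 = label.getD j 0)

theorem pvIdx_spec {N : Nat} {x : Int} (h1 : -(N:Int) ≤ x) (h2 : x < N) :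
    PySem.List.pyIdx? N x = some (pvIdx N x) ∧ pvIdx N x < N := by
  unfold PySem.List.pyIdx? pvIdx
  by_cases h : 0 ≤ x
  · simp [h, h2, Int.toNat_lt (by omega : (0:Int) ≤ x)]
  · simp [h, h1]; omega

theorem pvPyGet_eq {p : List Int} {N : Nat} (hl : p.length = N) {x : Int}
    (h1 : -(N:Int) ≤ x) (h2 : x < N) :
    PySem.List.pyGet? p x = some (p.getD (pvIdx N x) 0) := by
  obtain ⟨hi, hlt⟩ := pvIdx_spec h1 h2
  simp [PySem.List.pyGet?, hl, hi, List.getD_eq_getElem?_getD,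
    List.getElem?_eq_getElem (by omega : pvIdx N x < p.length)]

theorem pvPySet_eq {p : List Int} {N : Nat} (hl : p.length = N) {x : Int} (v : Int)
    (h1 : -(N:Int) ≤ x) (h2 : x < N) :
    PySem.List.pySet? p x v = some (p.set (pvIdx N x) v) := by
  obtain ⟨hi, hlt⟩ := pvIdx_spec h1 h2
  simp [PySem.List.pySet?, hl, hi]


theorem pvUnionA_toList (fuel : Nat) (a ra : Array Int) (x y : Int) :
    (pvUnionA fuel a ra x y).map (fun t => (t.1.toList, t.2.1.toList, t.2.2)) =
    pvUnionL fuel a.toList ra.toList x y := by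
  simp only [pvUnionA, pvUnionL]
  rw [← pvFindA_toList fuel a x]
  cases hf1 : pvFindA fuel a x with
  | none => rfl
  | some pr1 =>
    simp only [Option.map_some]
    rw [← pvFindA_toList fuel pr1.1 y]
    cases hf2 : pvFindA fuel pr1.1 y with
    | none => rfl
    | some pr2 =>
      simp only [Option.map_some]
      by_cases hpp : pr1.2 = pr2.2
      · rw [if_pos hpp, if_pos hpp]
        rfl
      · rw [if_neg hpp, if_neg hpp]
        rw [← pvAGet?_toList ra pr1.2, ← pvAGet?_toList ra pr2.2]
        cases hr1 : pvAGet? ra pr1.2 with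
        | none => rfl
        | some rpx =>
          cases hr2 : pvAGet? ra pr2.2 with
          | none => rfl
          | some rpy =>
            dsimp only
            by_cases hlt : rpx < rpy
            · rw [if_pos hlt, if_pos hlt, ← pvASet?_toList pr2.1 pr1.2 pr2.2]
              cases pvASet? pr2.1 pr1.2 pr2.2 <;> simp
            · rw [if_neg hlt, if_neg hlt]
              by_cases hgt : rpx > rpy
              · rw [if_pos hgt, if_pos hgt, ← pvASet?_toList pr2.1 pr2.2 pr1.2]
                cases pvASet? pr2.1 pr2.2 pr1.2 <;> simp
              · rw [if_neg hgt, if_neg hgt, ← pvASet?_toList pr2.1 pr2.2 pr1.2,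
                  ← pvASet?_toList ra pr1.2 (rpx + 1)]
                cases pvASet? pr2.1 pr2.2 pr1.2 <;>
                  cases pvASet? ra pr1.2 (rpx + 1) <;> simp

theorem pvFoldEdges_toList (fuel : Nat) : ∀ (es : List (Int × Int)) (a ra : Array Int) (d : Int),
    (es.foldl (fun acc e =>
      match acc with
      | none => none
      | some (parent, rank, red) =>
        match pvUnionA fuel parent rank e.1 e.2 with
        | none => none
        | some (p', rk', b) => some (p', rk', if b then red else red + 1))
      (some (a, ra, d))).map (fun t => (t.1.toList, t.2.1.toList, t.2.2)) =
    es.foldl (fun acc e =>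
      match acc with
      | none => none
      | some (parent, rank, red) =>
        match pvUnionL fuel parent rank e.1 e.2 with
        | none => none
        | some (p', rk', b) => some (p', rk', if b then red else red + 1))
      (some (a.toList, ra.toList, d)) := by
  intro es
  induction es with
  | nil => intro a ra d; rfl
  | cons e es ih =>
    intro a ra d
    simp only [List.foldl_cons]
    rw [← pvUnionA_toList fuel a ra e.1 e.2]
    cases hu : pvUnionA fuel a ra e.1 e.2 with
    | none =>
      simp only [Option.map_none]
      clear ih hu
      induction es with
      | nil => rfl
      | cons e' es ih' => simpa using ih'
    | some t => simpa using ih t.1 t.2.1 (if t.2.2 then d else d + 1)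

theorem pvFoldRoots_toList (fuel : Nat) : ∀ (is : List Int) (a : Array Int) (acc : List Int),
    (is.foldl (fun acc i =>
      match acc with
      | none => none
      | some (parent, roots) =>
        match pvFindA fuel parent i with
        | none => none
        | some (p', r) => some (p', r :: roots))
      (some (a, acc))).map (fun t => (t.1.toList, t.2)) =
    is.foldl (fun acc i =>
      match acc with
      | none => none
      | some (parent, roots) =>
        match pvFindL fuel parent i with
        | none => none
        | some (p', r) => some (p', r :: roots))
      (some (a.toList, acc)) := by
  intro is
  induction is with
  | nil => intro a acc; rfl
  | cons i is ih =>
    intro a acc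
    simp only [List.foldl_cons]
    rw [← pvFindA_toList fuel a i]
    cases hf : pvFindA fuel a i with
    | none =>
      simp only [Option.map_none]
      clear ih hf
      induction is with
      | nil => rfl
      | cons i' is ih' => simpa using ih'
    | some pr => simpa using ih pr.1 (pr.2 :: acc)

theorem pvPget_lt {N : Nat} {p rk : List Int} (h : pvInv N p rk) {k : Nat} (hk : k < N) :
    pvPget p k < N := by
  have := (h.2.2.1 k hk).2
  unfold pvPget
  omega

theorem pvM_lt {N : Nat} {rk : List Int} {k : Nat} (hk : k < N) : pvM N rk k < N := by
  unfold pvM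
  have h1 : k ∈ (Finset.range N).filter (fun j => rk.getD j 0 ≤ rk.getD k 0) := by
    simp [Finset.mem_filter, Finset.mem_range, hk]
  have := Finset.card_pos.mpr ⟨k, h1⟩
  omega

theorem pvM_decr {N : Nat} {p rk : List Int} (h : pvInv N p rk) {k : Nat} (hk : k < N)
    (hnr : pvPget p k ≠ k) : pvM N rk (pvPget p k) < pvM N rk k := by
  have hlt := h.2.2.2 k hk hnr
  have hpk := pvPget_lt h hk
  unfold pvM
  have hsub : (Finset.range N).filter (fun j => rk.getD j 0 ≤ rk.getD k 0) ⊆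
      (Finset.range N).filter (fun j => rk.getD j 0 ≤ rk.getD (pvPget p k) 0) := by
    intro j hj
    simp only [Finset.mem_filter, Finset.mem_range] at hj ⊢
    exact ⟨hj.1, by omega⟩
  have hmem : pvPget p k ∈ (Finset.range N).filter (fun j => rk.getD j 0 ≤ rk.getD (pvPget p k) 0) := by
    simp [Finset.mem_filter, Finset.mem_range, hpk]
  have hnmem : pvPget p k ∉ (Finset.range N).filter (fun j => rk.getD j 0 ≤ rk.getD k 0) := by
    simp only [Finset.mem_filter, Finset.mem_range]
    intro hmem2
    omega
  have hcard := Finset.card_lt_card (Finset.ssubset_iff_of_subset hsub |>.mpr ⟨_, hmem, hnmem⟩)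
  have hle : ((Finset.range N).filter (fun j => rk.getD j 0 ≤ rk.getD (pvPget p k) 0)).card ≤ N := by
    simpa using Finset.card_filter_le (Finset.range N) _
  have h1 : 1 ≤ ((Finset.range N).filter (fun j => rk.getD j 0 ≤ rk.getD k 0)).card :=
    Finset.card_pos.mpr ⟨k, by simp [Finset.mem_filter, Finset.mem_range, hk]⟩
  omega

theorem pvRootF_stable {N : Nat} {p rk : List Int} (h : pvInv N p rk) :
    ∀ f f' k, k < N → pvM N rk k < f → pvM N rk k < f' →
      pvRootF f p k = pvRootF f' p k := by
  intro f
  induction f with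
  | zero => intro f' k _ hf _; omega
  | succ f ih =>
    intro f' k hk hf hf'
    match f', hf' with
    | f'+1, _ =>
      simp only [pvRootF]
      by_cases hr : pvPget p k = k
      · simp [hr]
      · simp only [if_neg hr]
        have hd := pvM_decr h hk hr
        exact ih f' (pvPget p k) (pvPget_lt h hk) (by omega) (by omega)

theorem pvRootF_isfix {N : Nat} {p rk : List Int} (h : pvInv N p rk) :
    ∀ f k, k < N → pvM N rk k < f →
      pvPget p (pvRootF f p k) = pvRootF f p k ∧ pvRootF f p k < N := by
  intro f
  induction f with
  | zero => intro k _ hf; omega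
  | succ f ih =>
    intro k hk hf
    simp only [pvRootF]
    by_cases hr : pvPget p k = k
    · simp [hr, hk]
    · simp only [if_neg hr]
      have hd := pvM_decr h hk hr
      exact ih (pvPget p k) (pvPget_lt h hk) (by omega)

theorem pvRoot_isfix {N : Nat} {p rk : List Int} (h : pvInv N p rk) {k : Nat} (hk : k < N) :
    pvPget p (pvRoot p k) = pvRoot p k ∧ pvRoot p k < N := by
  have hm := pvM_lt (rk := rk) hk
  unfold pvRoot
  rw [h.1]
  exact pvRootF_isfix h N k hk hm

theorem pvRoot_fix {p : List Int} {k : Nat} (hr : pvPget p k = k) : pvRoot p k = k := by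
  unfold pvRoot
  cases hl : p.length with
  | zero => simp [pvRootF]
  | succ m => simp [pvRootF, hr]

theorem pvRoot_step {N : Nat} {p rk : List Int} (h : pvInv N p rk) {k : Nat} (hk : k < N)
    (hnr : pvPget p k ≠ k) : pvRoot p k = pvRoot p (pvPget p k) := by
  have hm := pvM_lt (rk := rk) hk
  have hd := pvM_decr h hk hnr
  have hpk := pvPget_lt h hk
  have hmp := pvM_lt (rk := rk) hpk
  unfold pvRoot
  rw [h.1]
  have h1 : pvRootF N p k = pvRootF (pvM N rk k + 1) p k :=
    pvRootF_stable h N (pvM N rk k + 1) k hk hm (by omega)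
  rw [h1]
  simp only [pvRootF, if_neg hnr]
  exact pvRootF_stable h (pvM N rk k) N (pvPget p k) hpk (by omega) hmp


theorem pvRank_lt_root {N : Nat} {p rk : List Int} (h : pvInv N p rk) :
    ∀ m k, pvM N rk k = m → k < N → pvPget p k ≠ k →
      rk.getD k 0 < rk.getD (pvRoot p k) 0 := by
  intro m
  induction m using Nat.strong_induction_on with
  | _ m ih =>
    intro k hm hk hnr
    have hstep := pvRoot_step h hk hnr
    have hlt := h.2.2.2 k hk hnr
    have hpk := pvPget_lt h hk
    by_cases hr : pvPget p (pvPget p k) = pvPget p k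
    · rw [hstep, pvRoot_fix hr]; exact hlt
    · have hd := pvM_decr h hk hnr
      have := ih (pvM N rk (pvPget p k)) (by omega) (pvPget p k) rfl hpk hr
      rw [hstep]; omega

theorem pvPget_set {p : List Int} {t : Nat} (ht : t < p.length) (v : Int) (j : Nat) :
    pvPget (p.set t v) j = if j = t then v.toNat else pvPget p j := by
  unfold pvPget
  by_cases hj : j = t
  · subst hj; simp [List.getD_eq_getElem?_getD, List.getElem?_set_self ht]
  · simp [hj, List.getD_eq_getElem?_getD, List.getElem?_set_ne (by omega : t ≠ j)]

theorem pvGetD_set {p : List Int} {t : Nat} (ht : t < p.length) (v : Int) (j : Nat) :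
    (p.set t v).getD j 0 = if j = t then v else p.getD j 0 := by
  by_cases hj : j = t
  · subst hj; simp [List.getD_eq_getElem?_getD, List.getElem?_set_self ht]
  · simp [hj, List.getD_eq_getElem?_getD, List.getElem?_set_ne (by omega : t ≠ j)]

-- setting slot t to (the index of) a root r reachable from t preserves all roots
theorem pvRoot_set_root {N : Nat} {p rk rk' : List Int} (h : pvInv N p rk)
    {t r : Nat} (ht : t < N) (hrN : r < N) (hrfix : pvPget p r = r)
    (h' : pvInv N (p.set t (r : Int)) rk')
    (hroot : pvRoot p t = r) :
    ∀ m j, pvM N rk' j = m → j < N → pvRoot (p.set t (r : Int)) j = pvRoot p j := by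
  intro m
  induction m using Nat.strong_induction_on with
  | _ m ih =>
    intro j hm hj
    have htp : t < p.length := by rw [h.1]; exact ht
    have hps : ∀ k, pvPget (p.set t (r : Int)) k = if k = t then r else pvPget p k := by
      intro k
      rw [pvPget_set htp]
      simp
    by_cases hfix : pvPget (p.set t (r : Int)) j = j
    · rw [pvRoot_fix hfix]
      rw [hps j] at hfix
      by_cases hjt : j = t
      · subst hjt
        rw [if_pos rfl] at hfix
        rw [hroot, hfix]
      · rw [if_neg hjt] at hfix
        exact (pvRoot_fix hfix).symm
    · rw [pvRoot_step h' hj hfix]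
      by_cases hjt : j = t
      · subst hjt
        rw [hps j, if_pos rfl]
        have hrfix' : pvPget (p.set j (r : Int)) r = r := by
          rw [hps r]; split <;> simp_all
        rw [pvRoot_fix hrfix', hroot]
      · have hj2 : pvPget (p.set t (r : Int)) j = pvPget p j := by rw [hps j, if_neg hjt]
        have hnr : pvPget p j ≠ j := by rw [← hj2]; exact hfix
        have hj2N : pvPget p j < N := pvPget_lt h hj
        have hd := pvM_decr h' hj hfix
        rw [hj2] at hd
        rw [hj2]
        rw [ih (pvM N rk' (pvPget p j)) (by omega) (pvPget p j) rfl hj2N]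
        exact (pvRoot_step h hj hnr).symm

theorem pvSet_self {p : List Int} {t : Nat} (ht : t < p.length) {v : Int}
    (hv : p.getD t 0 = v) : p.set t v = p := by
  apply List.ext_getElem (by simp)
  intro i h1 h2
  rw [List.getElem_set]
  split
  · subst hv; simp_all [List.getD_eq_getElem?_getD]
  · rfl

theorem pvEntry_of_fix {N : Nat} {p rk : List Int} (h : pvInv N p rk) {k : Nat} (hk : k < N)
    (hfix : pvPget p k = k) : p.getD k 0 = (k : Int) := by
  have := (h.2.2.1 k hk).1
  unfold pvPget at hfix
  omega

theorem pvInv_set_rank_lt {N : Nat} {p rk : List Int} (h : pvInv N p rk) {t a : Nat}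
    (ht : t < N) (ha : a < N) (hlt : rk.getD t 0 < rk.getD a 0) :
    pvInv N (p.set t (a : Int)) rk := by
  have htp : t < p.length := by rw [h.1]; exact ht
  have hta : t ≠ a := by intro he; subst he; omega
  refine ⟨by simp [h.1], h.2.1, ?_, ?_⟩
  · intro k hk
    rw [pvGetD_set htp]
    split
    · omega
    · exact h.2.2.1 k hk
  · intro k hk hnr
    have hps : ∀ k, pvPget (p.set t (a : Int)) k = if k = t then a else pvPget p k := by
      intro k; rw [pvPget_set htp]; simp
    rw [hps] at hnr ⊢
    by_cases hkt : k = t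
    · subst hkt
      rw [if_pos rfl]
      exact hlt
    · simp only [if_neg hkt] at hnr ⊢
      exact h.2.2.2 k hk hnr

-- compression step: pointing k at its root preserves the invariant and all roots
theorem pvCompress_step {N : Nat} {p rk : List Int} (h : pvInv N p rk) {k : Nat} (hk : k < N) :
    pvInv N (p.set k ((pvRoot p k : Nat) : Int)) rk ∧
    (∀ j, j < N → pvRoot (p.set k ((pvRoot p k : Nat) : Int)) j = pvRoot p j) := by
  have htp : k < p.length := by rw [h.1]; exact hk
  obtain ⟨hrfix, hrN⟩ := pvRoot_isfix h hk
  by_cases hnr : pvPget p k = k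
  · have hself : p.set k ((pvRoot p k : Nat) : Int) = p := by
      apply pvSet_self htp
      rw [pvRoot_fix hnr]
      exact pvEntry_of_fix h hk hnr
    rw [hself]
    exact ⟨h, fun _ _ => rfl⟩
  · have hrlt := pvRank_lt_root h (pvM N rk k) k rfl hk hnr
    have h' := pvInv_set_rank_lt h hk hrN hrlt
    refine ⟨h', ?_⟩
    intro j hj
    exact pvRoot_set_root h hk hrN hrfix h' rfl (pvM N rk j) j rfl hj

theorem pvInv_set_rank_eq {N : Nat} {p rk : List Int} (h : pvInv N p rk) {a b : Nat}
    (ha : a < N) (hb : b < N) (hafix : pvPget p a = a) (hab : a ≠ b)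
    (heq : rk.getD a 0 = rk.getD b 0) :
    pvInv N (p.set b (a : Int)) (rk.set a (rk.getD a 0 + 1)) := by
  have htp : b < p.length := by rw [h.1]; exact hb
  have hark : a < rk.length := by rw [h.2.1]; exact ha
  have hrs : ∀ j, (rk.set a (rk.getD a 0 + 1)).getD j 0 =
      if j = a then rk.getD a 0 + 1 else rk.getD j 0 := fun j => pvGetD_set hark _ j
  have hps : ∀ k, pvPget (p.set b (a : Int)) k = if k = b then a else pvPget p k := by
    intro k; rw [pvPget_set htp]; simp
  refine ⟨by simp [h.1], by simp [h.2.1], ?_, ?_⟩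
  · intro k hk
    rw [pvGetD_set htp]
    split
    · omega
    · exact h.2.2.1 k hk
  · intro k hk hnr
    rw [hps] at hnr ⊢
    by_cases hkb : k = b
    · subst hkb
      rw [if_pos rfl] at hnr ⊢
      rw [hrs, hrs, if_neg (Ne.symm hab), if_pos rfl]
      omega
    · rw [if_neg hkb] at hnr ⊢
      have hko := h.2.2.2 k hk hnr
      have hka : k ≠ a := by
        intro he; subst he; exact hnr hafix
      rw [hrs, hrs, if_neg hka]
      by_cases hpa : pvPget p k = a
      · rw [if_pos hpa]
        rw [hpa] at hko
        omega
      · rw [if_neg hpa]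
        exact hko

-- union step: pointing root b at root a maps class b to a and fixes everything else
theorem pvRoot_set_union {N : Nat} {p rk rk' : List Int} (h : pvInv N p rk) {a b : Nat}
    (ha : a < N) (hb : b < N) (hafix : pvPget p a = a) (hbfix : pvPget p b = b)
    (hab : a ≠ b) (h' : pvInv N (p.set b (a : Int)) rk') :
    ∀ m j, pvM N rk' j = m → j < N →
      pvRoot (p.set b (a : Int)) j = if pvRoot p j = b then a else pvRoot p j := by
  intro m
  induction m using Nat.strong_induction_on with
  | _ m ih =>
    intro j hm hj
    have htp : b < p.length := by rw [h.1]; exact hb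
    have hps : ∀ k, pvPget (p.set b (a : Int)) k = if k = b then a else pvPget p k := by
      intro k; rw [pvPget_set htp]; simp
    by_cases hfix : pvPget (p.set b (a : Int)) j = j
    · rw [pvRoot_fix hfix]
      rw [hps j] at hfix
      by_cases hjb : j = b
      · subst hjb
        rw [if_pos rfl] at hfix
        omega
      · rw [if_neg hjb] at hfix
        rw [pvRoot_fix hfix, if_neg hjb]
    · rw [pvRoot_step h' hj hfix]
      by_cases hjb : j = b
      · subst hjb
        rw [hps j, if_pos rfl]
        have hafix' : pvPget (p.set j (a : Int)) a = a := by
          rw [hps a, if_neg (by omega : a ≠ j)]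
          exact hafix
        rw [pvRoot_fix hafix', pvRoot_fix hbfix, if_pos rfl]
      · have hj2 : pvPget (p.set b (a : Int)) j = pvPget p j := by rw [hps j, if_neg hjb]
        have hnr : pvPget p j ≠ j := by rw [← hj2]; exact hfix
        have hj2N : pvPget p j < N := pvPget_lt h hj
        have hd := pvM_decr h' hj hfix
        rw [hj2] at hd
        rw [hj2, ih (pvM N rk' (pvPget p j)) (by omega) (pvPget p j) rfl hj2N,
          ← pvRoot_step h hj hnr]

theorem pvIdx_natCast (N k : Nat) : pvIdx N (k : Int) = k := by
  simp [pvIdx]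

theorem pvEntry_cast {N : Nat} {p rk : List Int} (h : pvInv N p rk) {k : Nat} (hk : k < N) :
    p.getD k 0 = ((pvPget p k : Nat) : Int) := by
  have := (h.2.2.1 k hk).1
  unfold pvPget
  omega

-- find(x) for a nonnegative in-range argument: returns the root, preserves the
-- invariant and every root (path compression)
theorem pvFindL_core {N : Nat} {p rk : List Int} (h : pvInv N p rk) :
    ∀ f k, k < N → pvM N rk k < f →
      ∃ p', pvFindL f p (k : Int) = some (p', ((pvRoot p k : Nat) : Int)) ∧
        pvInv N p' rk ∧ ∀ j, j < N → pvRoot p' j = pvRoot p j := by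
  intro f
  induction f with
  | zero => intro k _ hf; omega
  | succ f ih =>
    intro k hk hf
    have hget := pvPyGet_eq h.1 (by omega : -(N:Int) ≤ (k:Int)) (by omega : (k:Int) < N)
    rw [pvIdx_natCast] at hget
    simp only [pvFindL, hget]
    by_cases hnr : pvPget p k = k
    · have hek : p.getD k 0 = (k : Int) := pvEntry_of_fix h hk hnr
      rw [if_neg (fun hne => hne hek)]
      exact ⟨p, by rw [pvRoot_fix hnr], h, fun _ _ => rfl⟩
    · have hek : p.getD k 0 = ((pvPget p k : Nat) : Int) := pvEntry_cast h hk
      have hne : p.getD k 0 ≠ (k : Int) := by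
        rw [hek]
        intro hc
        exact hnr (by exact_mod_cast hc)
      rw [if_pos hne, hek]
      have hkN2 := pvPget_lt h hk
      have hd := pvM_decr h hk hnr
      obtain ⟨p1, hfind, h1, hpres⟩ := ih (pvPget p k) hkN2 (by omega)
      rw [hfind]
      have hr : pvRoot p (pvPget p k) = pvRoot p k := (pvRoot_step h hk hnr).symm
      have hset := pvPySet_eq (p := p1) (N := N) h1.1
        (v := ((pvRoot p (pvPget p k) : Nat) : Int))
        (by omega : -(N:Int) ≤ (k:Int)) (by omega : (k:Int) < N)
      rw [pvIdx_natCast] at hset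
      simp only [hset]
      have hr1 : pvRoot p1 k = pvRoot p k := hpres k hk
      obtain ⟨h2, hpres2⟩ := pvCompress_step h1 (k := k) hk
      rw [hr1] at h2 hpres2
      rw [hr]
      exact ⟨p1.set k ((pvRoot p k : Nat) : Int), rfl, h2,
        fun j hj => (hpres2 j hj).trans (hpres j hj)⟩

-- find(x) for any in-range (possibly negative) index, with the fuel the port uses
theorem pvFindL_ok {N : Nat} {p rk : List Int} (h : pvInv N p rk) {x : Int}
    (hx1 : -(N:Int) ≤ x) (hx2 : x < N) :
    ∃ p', pvFindL (N+1) p x = some (p', ((pvRoot p (pvIdx N x) : Nat) : Int)) ∧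
      pvInv N p' rk ∧ ∀ j, j < N → pvRoot p' j = pvRoot p j := by
  by_cases hneg : 0 ≤ x
  · have hxk : x = ((x.toNat : Nat) : Int) := by omega
    have hik : pvIdx N x = x.toNat := by simp [pvIdx, hneg]
    rw [hik, hxk]
    exact pvFindL_core h (N+1) x.toNat (by omega) (by
      have := pvM_lt (N := N) (rk := rk) (k := x.toNat) (by omega)
      omega)
  · -- negative index: parent[x] != x always holds (entries are ≥ 0 > x)
    set k := pvIdx N x with hkdef
    have hkN : k < N := (pvIdx_spec hx1 hx2).2
    have hget := pvPyGet_eq h.1 hx1 hx2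
    rw [← hkdef] at hget
    simp only [pvFindL, hget]
    have hek : p.getD k 0 = ((pvPget p k : Nat) : Int) := pvEntry_cast h hkN
    have hne : p.getD k 0 ≠ x := by
      have := (h.2.2.1 k hkN).1
      omega
    rw [if_pos hne, hek]
    have hkN2 := pvPget_lt h hkN
    obtain ⟨p1, hfind, h1, hpres⟩ := pvFindL_core h N (pvPget p k) hkN2
      (pvM_lt (rk := rk) hkN2)
    rw [hfind]
    have hr : pvRoot p (pvPget p k) = pvRoot p k := by
      by_cases hnr : pvPget p k = k
      · rw [hnr]
      · exact (pvRoot_step h hkN hnr).symm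
    have hset := pvPySet_eq (p := p1) (N := N) h1.1
      (v := ((pvRoot p (pvPget p k) : Nat) : Int)) hx1 hx2
    rw [← hkdef] at hset
    simp only [hset]
    have hr1 : pvRoot p1 k = pvRoot p k := hpres k hkN
    obtain ⟨h2, hpres2⟩ := pvCompress_step h1 (k := k) hkN
    rw [hr1] at h2 hpres2
    rw [hr]
    exact ⟨p1.set k ((pvRoot p k : Nat) : Int), rfl, h2,
      fun j hj => (hpres2 j hj).trans (hpres j hj)⟩

theorem pvUnionL_ok {N : Nat} {p rk : List Int} (h : pvInv N p rk) {x y : Int}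
    (hx1 : -(N:Int) ≤ x) (hx2 : x < N) (hy1 : -(N:Int) ≤ y) (hy2 : y < N) :
    ∃ p' rk' b, pvUnionL (N+1) p rk x y = some (p', rk', b) ∧ pvInv N p' rk' ∧
      ((pvRoot p (pvIdx N x) = pvRoot p (pvIdx N y) ∧ b = false ∧ rk' = rk ∧
          ∀ j, j < N → pvRoot p' j = pvRoot p j) ∨
       (pvRoot p (pvIdx N x) ≠ pvRoot p (pvIdx N y) ∧ b = true ∧
          ∃ W L, ((W = pvRoot p (pvIdx N x) ∧ L = pvRoot p (pvIdx N y)) ∨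
                  (W = pvRoot p (pvIdx N y) ∧ L = pvRoot p (pvIdx N x))) ∧
            ∀ j, j < N → pvRoot p' j = if pvRoot p j = L then W else pvRoot p j)) := by
  set a := pvRoot p (pvIdx N x) with hadef
  set c := pvRoot p (pvIdx N y) with hcdef
  have hxN : pvIdx N x < N := (pvIdx_spec hx1 hx2).2
  have hyN : pvIdx N y < N := (pvIdx_spec hy1 hy2).2
  have haN : a < N := (pvRoot_isfix h hxN).2
  have hcN : c < N := (pvRoot_isfix h hyN).2
  obtain ⟨p1, hf1, h1, hpres1⟩ := pvFindL_ok h hx1 hx2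
  rw [← hadef] at hf1
  obtain ⟨p2, hf2, h2, hpres2⟩ := pvFindL_ok h1 hy1 hy2
  have hc2 : pvRoot p1 (pvIdx N y) = c := hpres1 _ hyN
  rw [hc2] at hf2
  have hpres12 : ∀ j, j < N → pvRoot p2 j = pvRoot p j :=
    fun j hj => (hpres2 j hj).trans (hpres1 j hj)
  have hafix : pvPget p2 a = a := by
    have := (pvRoot_isfix h2 hxN).1
    rwa [hpres12 _ hxN, ← hadef] at this
  have hcfix : pvPget p2 c = c := by
    have := (pvRoot_isfix h2 hyN).1
    rwa [hpres12 _ hyN, ← hcdef] at this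
  simp only [pvUnionL, hf1, hf2]
  by_cases hac : a = c
  · rw [if_pos (by exact_mod_cast hac)]
    exact ⟨p2, rk, false, rfl, h2, Or.inl ⟨hac, rfl, rfl, hpres12⟩⟩
  · rw [if_neg (by exact_mod_cast hac)]
    have hga := pvPyGet_eq h.2.1 (by omega : -(N:Int) ≤ ((a:Nat):Int)) (by exact_mod_cast haN)
    have hgc := pvPyGet_eq h.2.1 (by omega : -(N:Int) ≤ ((c:Nat):Int)) (by exact_mod_cast hcN)
    rw [pvIdx_natCast] at hga hgc
    simp only [hga, hgc]
    have hroots2 : ∀ j, j < N → pvRoot p2 j = pvRoot p j := hpres12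
    by_cases hlt : rk.getD a 0 < rk.getD c 0
    · rw [if_pos hlt]
      have hsa := pvPySet_eq (p := p2) (N := N) h2.1 (v := ((c:Nat):Int))
        (x := ((a:Nat):Int)) (by omega) (by exact_mod_cast haN)
      rw [pvIdx_natCast] at hsa
      rw [hsa]
      have h3 := pvInv_set_rank_lt h2 haN hcN hlt
      refine ⟨_, rk, true, rfl, h3, Or.inr ⟨hac, rfl, c, a, Or.inr ⟨rfl, rfl⟩, ?_⟩⟩
      intro j hj
      rw [pvRoot_set_union h2 hcN haN hcfix hafix (Ne.symm hac) h3 _ j rfl hj,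
        hroots2 j hj]
    · rw [if_neg hlt]
      by_cases hgt : rk.getD a 0 > rk.getD c 0
      · rw [if_pos hgt]
        have hsc := pvPySet_eq (p := p2) (N := N) h2.1 (v := ((a:Nat):Int))
          (x := ((c:Nat):Int)) (by omega) (by exact_mod_cast hcN)
        rw [pvIdx_natCast] at hsc
        rw [hsc]
        have h3 := pvInv_set_rank_lt h2 hcN haN hgt
        refine ⟨_, rk, true, rfl, h3, Or.inr ⟨hac, rfl, a, c, Or.inl ⟨rfl, rfl⟩, ?_⟩⟩
        intro j hj
        rw [pvRoot_set_union h2 haN hcN hafix hcfix hac h3 _ j rfl hj, hroots2 j hj]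
      · rw [if_neg hgt]
        have heq : rk.getD a 0 = rk.getD c 0 := by omega
        have hsc := pvPySet_eq (p := p2) (N := N) h2.1 (v := ((a:Nat):Int))
          (x := ((c:Nat):Int)) (by omega) (by exact_mod_cast hcN)
        rw [pvIdx_natCast] at hsc
        have hsr := pvPySet_eq (p := rk) (N := N) h.2.1 (v := rk.getD a 0 + 1)
          (x := ((a:Nat):Int)) (by omega) (by exact_mod_cast haN)
        rw [pvIdx_natCast] at hsr
        rw [hsc, hsr]
        have h3 := pvInv_set_rank_eq h2 haN hcN hafix hac heq
        refine ⟨_, _, true, rfl, ?_, Or.inr ⟨hac, rfl, a, c, Or.inl ⟨rfl, rfl⟩, ?_⟩⟩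
        · exact h3
        · intro j hj
          rw [pvRoot_set_union h2 haN hcN hafix hcfix hac h3 _ j rfl hj, hroots2 j hj]

theorem pvDiscard_length {s : List Int} (hs : s.Nodup) (x : Int) :
    (PySem.Set.discard s x).length = if x ∈ s then s.length - 1 else s.length := by
  have hfe : PySem.Set.discard s x = s.erase x := by
    rw [hs.erase_eq_filter x]
    rfl
  rw [hfe]
  split
  · exact List.length_erase_of_mem (by assumption)
  · rw [List.erase_of_not_mem (by assumption)]

theorem pvMem_getD {xs : List Int} {x : Int} :
    x ∈ xs ↔ ∃ k, k < xs.length ∧ xs.getD k 0 = x := by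
  rw [List.mem_iff_getElem]
  constructor
  · rintro ⟨i, h, rfl⟩
    exact ⟨i, h, List.getD_eq_getElem xs 0 h⟩
  · rintro ⟨k, hk, he⟩
    exact ⟨k, hk, by rw [← List.getD_eq_getElem xs 0 hk, he]⟩

-- two lists with the same equality pattern have the same number of distinct values
theorem pvDistinct_eq : ∀ (xs ys : List Int), xs.length = ys.length →
    (∀ i j, i < xs.length → j < xs.length →
      (xs.getD i 0 = xs.getD j 0 ↔ ys.getD i 0 = ys.getD j 0)) →
    (PySem.Set.ofList xs).length = (PySem.Set.ofList ys).length := by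
  intro xs
  induction xs with
  | nil =>
    intro ys hl _
    have : ys = [] := List.eq_nil_of_length_eq_zero hl.symm
    subst this
    rfl
  | cons x xs ih =>
    intro ys hl hiff
    match ys, hl with
    | y :: ys, hl =>
      have hlt : xs.length = ys.length := by simpa using hl
      rw [PySem.Set.ofList_cons, PySem.Set.ofList_cons]
      simp only [List.length_cons]
      rw [pvDiscard_length (PySem.Set.nodup_ofList xs) x,
        pvDiscard_length (PySem.Set.nodup_ofList ys) y]
      have hmemiff : x ∈ PySem.Set.ofList xs ↔ y ∈ PySem.Set.ofList ys := by
        rw [PySem.Set.mem_ofList, PySem.Set.mem_ofList, pvMem_getD, pvMem_getD]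
        constructor
        · rintro ⟨k, hk, he⟩
          refine ⟨k, by omega, ?_⟩
          have := hiff 0 (k+1) (by simp) (by simp; omega)
          simp only [List.getD_cons_zero, List.getD_cons_succ] at this
          exact (this.mp he.symm).symm
        · rintro ⟨k, hk, he⟩
          refine ⟨k, by omega, ?_⟩
          have := hiff 0 (k+1) (by simp) (by simp; omega)
          simp only [List.getD_cons_zero, List.getD_cons_succ] at this
          exact (this.mpr he.symm).symm
      have hrec := ih ys hlt (by
        intro i j hi hj
        have := hiff (i+1) (j+1) (by simp; omega) (by simp; omega)
        simpa using this)
      have hle1 := PySem.Set.length_ofList_le xs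
      have hle2 := PySem.Set.length_ofList_le ys
      by_cases hx : x ∈ PySem.Set.ofList xs
      · rw [if_pos hx, if_pos (hmemiff.mp hx), hrec]
      · rw [if_neg hx, if_neg (fun hy => hx (hmemiff.mpr hy)), hrec]

theorem pvC_eq_card (l : List Int) : pvC l = (l.toFinset.card : Int) := by
  unfold pvC
  congr 1
  have h1 : (PySem.Set.ofList l).toFinset = l.toFinset := by
    ext y
    simp [PySem.Set.mem_ofList]
  rw [← List.toFinset_card_of_nodup (PySem.Set.nodup_ofList l), h1]

theorem pvC_reverse (l : List Int) : pvC l.reverse = pvC l := by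
  rw [pvC_eq_card, pvC_eq_card, List.toFinset_reverse]

theorem pvC_subst {l : List Int} {lu lv : Int} (hu : lu ∈ l) (hv : lv ∈ l)
    (hne : lu ≠ lv) :
    pvC (l.map (fun t => if t = lv then lu else t)) = pvC l - 1 := by
  rw [pvC_eq_card, pvC_eq_card]
  have himg : (l.map (fun t => if t = lv then lu else t)).toFinset
      = l.toFinset.erase lv := by
    ext y
    simp only [List.mem_toFinset, List.mem_map, Finset.mem_erase]
    constructor
    · rintro ⟨t, ht, rfl⟩
      split
      · exact ⟨hne, hu⟩
      · exact ⟨by assumption, ht⟩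
    · rintro ⟨hyv, hy⟩
      exact ⟨y, hy, if_neg hyv⟩
  rw [himg, Finset.card_erase_of_mem (List.mem_toFinset.mpr hv)]
  have : 0 < l.toFinset.card := Finset.card_pos.mpr ⟨lv, List.mem_toFinset.mpr hv⟩
  omega

theorem pvSetLen_eq (l : List Int) : pvSetLen l = pvC l := by
  rw [pvC_eq_card]
  unfold pvSetLen
  congr 1
  have hnd : (Std.HashSet.ofList l).toList.Nodup := by
    have h := Std.HashSet.distinct_toList (m := Std.HashSet.ofList l)
    exact h.imp (fun hab => by simpa using hab)
  have hmem : ∀ x : Int, x ∈ (Std.HashSet.ofList l).toList ↔ x ∈ l := by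
    intro x
    rw [Std.HashSet.mem_toList, Std.HashSet.mem_ofList, List.contains_iff_mem]
  rw [← Std.HashSet.length_toList (m := Std.HashSet.ofList l),
    ← List.toFinset_card_of_nodup hnd]
  congr 1
  ext y
  simp [hmem]

theorem pvMerge_iff {ri rj a c W L : Nat} {li lj lu lv : Int}
    (hWL : (W = a ∧ L = c) ∨ (W = c ∧ L = a)) (hac : a ≠ c) (hne : lu ≠ lv)
    (hia : ri = a ↔ li = lu) (hic : ri = c ↔ li = lv)
    (hja : rj = a ↔ lj = lu) (hjc : rj = c ↔ lj = lv)
    (hij : ri = rj ↔ li = lj) :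
    ((if ri = L then W else ri) = (if rj = L then W else rj)) ↔
    ((if li = lv then lu else li) = (if lj = lv then lu else lj)) := by
  rcases hWL with ⟨rfl, rfl⟩ | ⟨rfl, rfl⟩ <;> split_ifs <;> omega

-- one simultaneous induction over the edge list: A's union-find loop and B's
-- label-substitution loop stay coupled, and redundant counts the edge surplus
theorem pvLoop_sim {N : Nat} :
    ∀ (es : List (Int × Int)) (p rk label : List Int) (red : Int),
    pvCouple N p rk label →
    (∀ e ∈ es, (-(N:Int) ≤ e.1 ∧ e.1 < N) ∧ (-(N:Int) ≤ e.2 ∧ e.2 < N)) →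
    ∃ p' rk' red' label',
      es.foldl (fun acc e =>
        match acc with
        | none => none
        | some (parent, rank, red) =>
          match pvUnionL (N+1) parent rank e.1 e.2 with
          | none => none
          | some (p', rk', b) => some (p', rk', if b then red else red + 1))
        (some (p, rk, red)) = some (p', rk', red') ∧
      es.foldl (fun acc e =>
        match acc with
        | none => none
        | some label =>
          match PySem.List.pyGet? label e.1, PySem.List.pyGet? label e.2 with
          | some lu, some lv =>
            if lu ≠ lv then some (label.map (fun t => if t = lv then lu else t))
            else some label
          | _, _ => none) (some label) = some label' ∧
      pvCouple N p' rk' label' ∧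
      red' = red + es.length + (pvC label' - pvC label) := by
  intro es
  induction es with
  | nil =>
    intro p rk label red hc _
    exact ⟨p, rk, red, label, rfl, rfl, hc, by simp⟩
  | cons e es ih =>
    intro p rk label red hc hval
    obtain ⟨hinv, hlablen, hcouple⟩ := hc
    obtain ⟨⟨hx1, hx2⟩, ⟨hy1, hy2⟩⟩ := hval e (List.mem_cons_self)
    have hvals : ∀ e' ∈ es, (-(N:Int) ≤ e'.1 ∧ e'.1 < N) ∧ (-(N:Int) ≤ e'.2 ∧ e'.2 < N) :=
      fun e' he' => hval e' (List.mem_cons_of_mem e he')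
    set ku := pvIdx N e.1 with hkudef
    set kv := pvIdx N e.2 with hkvdef
    have hkuN : ku < N := (pvIdx_spec hx1 hx2).2
    have hkvN : kv < N := (pvIdx_spec hy1 hy2).2
    have hgu := pvPyGet_eq (p := label) (by rw [hlablen]) hx1 hx2
    have hgv := pvPyGet_eq (p := label) (by rw [hlablen]) hy1 hy2
    rw [← hkudef] at hgu
    rw [← hkvdef] at hgv
    set lu := label.getD ku 0 with hludef
    set lv := label.getD kv 0 with hlvdef
    obtain ⟨p1, rk1, b, hun, hinv1, hcase⟩ := pvUnionL_ok hinv hx1 hx2 hy1 hy2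
    rw [← hkudef, ← hkvdef] at hcase
    have hroot_iff : pvRoot p ku = pvRoot p kv ↔ lu = lv := hcouple ku kv hkuN hkvN
    simp only [List.foldl_cons, hun, hgu, hgv]
    rcases hcase with ⟨heq, hb, hrk1, hpres⟩ | ⟨hne, hb, W, L, hWL, hroots⟩
    · -- redundant edge: roots equal, labels equal
      have hluv : lu = lv := hroot_iff.mp heq
      rw [if_neg (not_not_intro hluv), hb, hrk1]
      have hred0 : (if false then red else red + 1) = red + 1 := by simp
      rw [hred0]
      have hc1 : pvCouple N p1 rk label := by
        refine ⟨hrk1 ▸ hinv1, hlablen, ?_⟩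
        intro i j hi hj
        rw [hpres i hi, hpres j hj]
        exact hcouple i j hi hj
      obtain ⟨p2, rk2, red2, label2, hA, hB, hc2, hred⟩ := ih p1 rk label (red + 1) hc1 hvals
      refine ⟨p2, rk2, red2, label2, hA, hB, hc2, ?_⟩
      rw [hred]
      simp
      omega
    · -- merging edge: roots differ, labels differ
      have hluv : lu ≠ lv := fun hl => hne (hroot_iff.mpr hl)
      rw [if_pos hluv, hb]
      have hred0 : (if true then red else red + 1) = red := by simp
      rw [hred0]
      set label1 := label.map (fun t => if t = lv then lu else t) with hl1def
      have hl1len : label1.length = N := by rw [hl1def, List.length_map, hlablen]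
      have hl1get : ∀ i, i < N → label1.getD i 0 =
          if label.getD i 0 = lv then lu else label.getD i 0 := by
        intro i hi
        have hil : i < label.length := by omega
        rw [hl1def, List.getD_eq_getElem _ _ (by simpa using hil), List.getElem_map,
          List.getD_eq_getElem _ _ hil]
      have hmemu : lu ∈ label := pvMem_getD.mpr ⟨ku, by omega, rfl⟩
      have hmemv : lv ∈ label := pvMem_getD.mpr ⟨kv, by omega, rfl⟩
      have hc1 : pvCouple N p1 rk1 label1 := by
        refine ⟨hinv1, hl1len, ?_⟩
        intro i j hi hj
        rw [hroots i hi, hroots j hj, hl1get i hi, hl1get j hj]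
        exact pvMerge_iff hWL hne hluv
          (hcouple i ku hi hkuN) (hcouple i kv hi hkvN)
          (hcouple j ku hj hkuN) (hcouple j kv hj hkvN)
          (hcouple i j hi hj)
      obtain ⟨p2, rk2, red2, label2, hA, hB, hc2, hred⟩ := ih p1 rk1 label1 red hc1 hvals
      refine ⟨p2, rk2, red2, label2, hA, hB, hc2, ?_⟩
      rw [hred, hl1def, pvC_subst hmemu hmemv hluv]
      simp
      omega

-- the components pass: find(i) for i in range(n) collects the roots (state keeps
-- changing by compression, but every root is preserved)
theorem pvRoots_fold {N : Nat} {rk : List Int} :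
    ∀ (is : List Int) (p : List Int) (acc : List Int), pvInv N p rk →
    (∀ x ∈ is, 0 ≤ x ∧ x < (N:Int)) →
    ∃ p'', is.foldl (fun acc i =>
        match acc with
        | none => none
        | some (parent, roots) =>
          match pvFindL (N+1) parent i with
          | none => none
          | some (p', r) => some (p', r :: roots))
        (some (p, acc)) =
      some (p'', (is.map (fun i => ((pvRoot p (pvIdx N i) : Nat) : Int))).reverse ++ acc) := by
  intro is
  induction is with
  | nil => intro p acc h _; exact ⟨p, by simp⟩
  | cons i is ih =>
    intro p acc h hval
    obtain ⟨hi0, hiN⟩ := hval i (List.mem_cons_self)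
    obtain ⟨p1, hf, h1, hpres⟩ := pvFindL_ok h (by omega) hiN
    simp only [List.foldl_cons, hf]
    obtain ⟨p2, hrec⟩ := ih p1 (((pvRoot p (pvIdx N i) : Nat) : Int) :: acc) h1
      (fun x hx => hval x (List.mem_cons_of_mem i hx))
    refine ⟨p2, ?_⟩
    rw [hrec]
    congr 1
    have hmap : is.map (fun i => ((pvRoot p1 (pvIdx N i) : Nat) : Int)) =
        is.map (fun i => ((pvRoot p (pvIdx N i) : Nat) : Int)) := by
      apply List.map_congr_left
      intro x hx
      obtain ⟨h0, hN⟩ := hval x (List.mem_cons_of_mem i hx)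
      rw [hpres (pvIdx N x) (pvIdx_spec (by omega) hN).2]
    rw [hmap]
    simp

-- ===== VERDICT (by name: the statement is the Claim_ definition above) =====
theorem min_operations_to_connect_spec : Claim_equal_min_operations_to_connect := by
  intro n edges hdom hpre
  unfold Spec_min_operations_to_connect
  by_cases hn0 : n ≤ 0
  · -- no vertices: Pre_ forces edges = [], both sides return -1
    have hedges : edges = [] := by
      cases edges with
      | nil => rfl
      | cons e es =>
        have := hpre e List.mem_cons_self
        omega
    subst hedges
    simp only [min_operations_to_connect, min_operations_to_connect_alt,
      PySem.List.pyRange_one_eq_nil hn0, List.foldl_nil, List.length_nil]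
    have h0 : pvSetLen ([] : List Int) = 0 := by
      rw [pvSetLen_eq]
      rfl
    rw [h0]
    simp only [List.length_nil, Nat.cast_zero]
    rw [if_pos (by omega : (0:Int) ≥ 0 - 1), if_pos (by omega : (0:Int) ≥ n - 1)]
  · -- n > 0
    set N := n.toNat with hNdef
    have hn : ((N : Nat) : Int) = n := by omega
    set p0 := PySem.List.pyRange 0 n 1 with hp0def
    have hlen0 : p0.length = N := by
      rw [hp0def, PySem.List.length_pyRange_one]
      omega
    have hget0 : ∀ k, k < N → p0.getD k 0 = (k : Int) := by
      intro k hk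
      rw [List.getD_eq_getElem?_getD, hp0def, PySem.List.getElem?_pyRange_one,
        if_pos (by omega : k < (n - 0).toNat)]
      simp
    have hfix0 : ∀ k, k < N → pvPget p0 k = k := by
      intro k hk
      unfold pvPget
      rw [hget0 k hk]
      simp
    have hinv0 : pvInv N p0 (List.replicate n.toNat (0:Int)) := by
      refine ⟨hlen0, by simp [hNdef], ?_, ?_⟩
      · intro k hk
        rw [hget0 k hk]
        omega
      · intro k hk hnr
        exact absurd (hfix0 k hk) hnr
    have hcouple0 : pvCouple N p0 (List.replicate n.toNat (0:Int)) p0 := by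
      refine ⟨hinv0, hlen0, ?_⟩
      intro i j hi hj
      rw [pvRoot_fix (hfix0 i hi), pvRoot_fix (hfix0 j hj),
        hget0 i hi, hget0 j hj]
      omega
    have hC0 : pvC p0 = (N : Int) := by
      unfold pvC
      rw [hp0def, PySem.Set.ofList_eq_self_of_nodup _ (PySem.List.nodup_pyRange_one 0 n),
        PySem.List.length_pyRange_one]
      omega
    have hval : ∀ e ∈ edges, (-(N:Int) ≤ e.1 ∧ e.1 < N) ∧ (-(N:Int) ≤ e.2 ∧ e.2 < N) := by
      intro e he
      have := hpre e he
      omega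
    obtain ⟨p', rk', red', label', hA, hB, ⟨hinv', hlablen', hcouple'⟩, hred⟩ :=
      pvLoop_sim edges p0 (List.replicate n.toNat (0:Int)) p0 0 hcouple0 hval
    obtain ⟨p'', hroots⟩ := pvRoots_fold (rk := rk') (PySem.List.pyRange 0 n 1) p' [] hinv'
      (fun x hx => by
        have := (PySem.List.mem_pyRange_one (a := 0) (b := n) (x := x)).mp hx
        omega)
    simp only [min_operations_to_connect, min_operations_to_connect_alt]
    have hsize : (PySem.List.pyRange 0 n 1).toArray.size = N := by
      rw [List.size_toArray]
      exact hlen0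
    rw [hsize, hB]
    have hAarr := pvFoldEdges_toList (N+1) edges
      (PySem.List.pyRange 0 n 1).toArray (Array.replicate n.toNat 0) 0
    rw [List.toList_toArray, Array.toList_replicate, ← hp0def, hA] at hAarr
    obtain ⟨t, ht, htproj⟩ := Option.map_eq_some_iff.mp hAarr
    obtain ⟨ht1, ht2, ht3⟩ : t.1.toList = p' ∧ t.2.1.toList = rk' ∧ t.2.2 = red' := by
      have := htproj
      simp only [Prod.mk.injEq] at this
      exact ⟨this.1, this.2.1, this.2.2⟩
    rw [ht]
    have hRarr := pvFoldRoots_toList (N+1) (PySem.List.pyRange 0 n 1) t.1 []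
    rw [ht1, hroots] at hRarr
    obtain ⟨u, hu, huproj⟩ := Option.map_eq_some_iff.mp hRarr
    obtain ⟨hu1, hu2⟩ : u.1.toList = p'' ∧ u.2 = ((PySem.List.pyRange 0 n 1).map
        (fun i => ((pvRoot p' (pvIdx N i) : Nat) : Int))).reverse ++ [] := by
      have := huproj
      simp only [Prod.mk.injEq] at this
      exact ⟨this.1, this.2⟩
    simp only [hu, hu2, List.append_nil, ht3]
    have hrootsget : ∀ i, i < N →
        ((PySem.List.pyRange 0 n 1).map
            (fun i => ((pvRoot p' (pvIdx N i) : Nat) : Int))).getD i 0 =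
          ((pvRoot p' i : Nat) : Int) := by
      intro i hi
      rw [List.getD_eq_getElem?_getD, List.getElem?_map, PySem.List.getElem?_pyRange_one,
        if_pos (by omega : i < (n - 0).toNat)]
      norm_num [pvIdx]
    have hCeq : ((PySem.Set.ofList ((PySem.List.pyRange 0 n 1).map
        (fun i => ((pvRoot p' (pvIdx N i) : Nat) : Int)))).length : Int)
        = pvC label' := by
      unfold pvC
      congr 1
      apply pvDistinct_eq
      · rw [List.length_map, PySem.List.length_pyRange_one, hlablen']
        omega
      · intro i j hi hj
        rw [List.length_map, PySem.List.length_pyRange_one] at hi hj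
        have hiN : i < N := by omega
        have hjN : j < N := by omega
        rw [hrootsget i hiN, hrootsget j hjN, Nat.cast_inj]
        exact hcouple' i j hiN hjN
    have hCrev : pvSetLen (((PySem.List.pyRange 0 n 1).map
        (fun i => ((pvRoot p' (pvIdx N i) : Nat) : Int))).reverse) = pvC label' := by
      rw [pvSetLen_eq, pvC_reverse]
      exact hCeq
    rw [hCrev, pvSetLen_eq label']
    rw [hC0] at hred
    by_cases hcond : (edges.length : Int) ≥ n - 1
    · rw [if_pos (by omega), if_pos (by omega)]
    · rw [if_neg (by omega), if_neg (by omega)]
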